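-- pv_equiv track=rewrite | github.com/seancurt/stuff | LCA.py | levelsort
-- ===== SOURCE A (Python) =====
-- def levelsort(binarytree):
--     levelsize = 1
--     sortedtree = []
--
--     i = 0
--     n = len(binarytree)
--
--     while i < n:
--         sortedtree.append(binarytree[i:i + levelsize])
--         i += levelsize
--         levelsize *= 2
--
--     return sortedtree
-- ===== SOURCE B (Python) =====
-- def levelsort(binarytree):
--     levels = []
--     for i, x in enumerate(binarytree):
--         if i + 1 == 2 ** len(levels):   # all current levels are full: open a new one
--             levels.append([])
--         levels[-1].append(x)
--     return levels
-- ===== Notes on version B (the rewrite author's own statement) =====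
-- stated objective: alternative
-- what changed: B never slices: it makes one element-wise pass, appending each element to the last level of an accumulator and opening a new empty level exactly when i+1 == 2**len(levels), whereas A repeatedly slices the list with a running index and doubling level size.
import Mathlib
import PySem

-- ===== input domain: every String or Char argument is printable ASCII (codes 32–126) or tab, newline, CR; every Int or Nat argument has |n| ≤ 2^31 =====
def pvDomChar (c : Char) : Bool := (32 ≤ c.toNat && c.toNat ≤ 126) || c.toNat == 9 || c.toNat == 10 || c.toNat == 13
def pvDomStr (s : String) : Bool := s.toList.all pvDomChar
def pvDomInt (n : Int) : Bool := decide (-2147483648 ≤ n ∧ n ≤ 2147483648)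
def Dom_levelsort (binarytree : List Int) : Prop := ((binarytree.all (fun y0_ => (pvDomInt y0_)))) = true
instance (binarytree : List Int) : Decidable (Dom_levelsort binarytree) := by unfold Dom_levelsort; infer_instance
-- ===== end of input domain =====

-- B builds the levels in one element-wise pass, appending each element to the last level and
-- opening a new level when i+1 == 2**len(levels), instead of A's per-level slicing loop; same cost, different algorithm.

-- ===== PORT A =====
-- the while loop of A: state (i, levelsize, acc); i and levelsize stay nonnegative in Python, so carried as Nat
def levelsortLoop (bt : List Int) (n i levelsize : Nat) (hls : 0 < levelsize)
    (acc : List (List Int)) : List (List Int) :=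
  if i < n then
    levelsortLoop bt n (i + levelsize) (levelsize * 2) (by omega)
      (acc ++ [PySem.List.slice bt (some (i : Int)) (some ((i : Int) + (levelsize : Int)))])
  else acc
termination_by n - i
decreasing_by omega

def levelsort (binarytree : List Int) : List (List Int) :=
  levelsortLoop binarytree binarytree.length 0 1 (by omega) []

-- ===== PORT B =====
-- the loop body of B: maybe open a new level, then append x to the last level
-- (levels[-1].append(x): total form via dropLast/getLastD; the empty case is never reached, since i = 0 opens a level)
def levelsortStep (levels : List (List Int)) (i : Int) (x : Int) : List (List Int) :=
  let levels' := if i + 1 == 2 ^ levels.length then levels ++ [[]] else levels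
  levels'.dropLast ++ [levels'.getLastD [] ++ [x]]

def levelsort_alt (binarytree : List Int) : List (List Int) :=
  (PySem.List.enumerate binarytree).foldl (fun levels p => levelsortStep levels p.1 p.2) []

-- ===== PRECONDITION & SPEC =====
def Spec_levelsort (binarytree : List Int) (out : List (List Int)) : Prop := out = levelsort_alt binarytree
instance (binarytree : List Int) (out : List (List Int)) : Decidable (Spec_levelsort binarytree out) := by unfold Spec_levelsort; infer_instance

-- ===== CLAIM (what is proved, stated in full; the proofs are below) =====
def Claim_equal_levelsort : Prop := ∀ (binarytree : List Int), Dom_levelsort binarytree → Spec_levelsort binarytree (levelsort binarytree)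

-- ===== LEMMAS AND PROOFS =====

-- common closed form: level k is the elements at indices 2^k-1 .. 2^(k+1)-2
def levelSlices (bt : List Int) : List (List Int) :=
  (List.range bt.length.size).map (fun k => (bt.drop (2 ^ k - 1)).take (2 ^ k))

-- A equals the closed form
theorem levelsortLoop_eq (bt : List Int) (d : Nat) :
    ∀ (k : Nat) (acc : List (List Int)), bt.length.size - k = d →
    levelsortLoop bt bt.length (2 ^ k - 1) (2 ^ k) (Nat.two_pow_pos k) acc =
      acc ++ (List.range' k d).map (fun k => (bt.drop (2 ^ k - 1)).take (2 ^ k)) := by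
  induction d with
  | zero =>
    intro k acc hd
    have hn : bt.length < 2 ^ k := Nat.size_le.mp (by omega)
    rw [levelsortLoop]
    simp only [List.range', List.map_nil, List.append_nil]
    rw [if_neg (by omega)]
  | succ d ih =>
    intro k acc hd
    have hn : 2 ^ k ≤ bt.length := Nat.lt_size.mp (by omega)
    have h1 : 1 ≤ 2 ^ k := Nat.one_le_two_pow
    have hi : 2 ^ k - 1 + 2 ^ k = 2 ^ (k + 1) - 1 := by
      have : 2 ^ (k + 1) = 2 ^ k * 2 := by ring
      omega
    have hls : 2 ^ k * 2 = 2 ^ (k + 1) := by ring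
    rw [levelsortLoop, if_pos (by omega)]
    simp only [hi, hls, PySem.List.slice_natCast_add]
    rw [ih (k + 1) _ (by omega), List.range']
    simp only [List.map_cons, List.append_assoc, List.singleton_append]

theorem levelsort_eq_levelSlices (bt : List Int) : levelsort bt = levelSlices bt := by
  unfold levelsort levelSlices
  have h := levelsortLoop_eq bt bt.length.size 0 [] (by omega)
  simpa [List.range_eq_range'] using h

-- enumerate over an appended element
theorem enumerate_append_singleton (x : Int) (l : List Int) :
    ∀ s : Int, PySem.List.enumerate (l ++ [x]) s = PySem.List.enumerate l s ++ [((s + l.length : Int), x)] := by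
  induction l with
  | nil => intro s; simp [PySem.List.enumerate_cons, PySem.List.enumerate_nil]
  | cons y ys ih =>
    intro s
    simp only [List.cons_append, PySem.List.enumerate_cons, ih (s + 1), List.length_cons]
    push_cast
    ring_nf

-- a level fully inside l is unchanged by appending an element
theorem drop_take_append_of_le (l : List Int) (x : Int) (a t : Nat) (h : a + t ≤ l.length) :
    ((l ++ [x]).drop a).take t = (l.drop a).take t := by
  rw [List.drop_append, Nat.sub_eq_zero_of_le (by omega), List.drop_zero]
  exact List.take_append_of_le_length (by simp; omega)

-- B's step applied to the closed form of l yields the closed form of l ++ [x]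
theorem step_levelSlices (l : List Int) (x : Int) :
    levelsortStep (levelSlices l) (l.length : Int) x = levelSlices (l ++ [x]) := by
  set n := l.length with hn
  set m := n.size with hm
  have hlen : (levelSlices l).length = m := by
    simp only [levelSlices, List.length_map, List.length_range]; rw [← hn, ← hm]
  by_cases hpow : n + 1 = 2 ^ m
  · -- all levels full: a new level [x] is opened
    have hsize : (n + 1).size = m + 1 := by rw [hpow]; exact Nat.size_pow
    unfold levelsortStep
    rw [hlen, if_pos (show (((n : Int) + 1 == 2 ^ m)) = true by
      rw [beq_iff_eq]; exact_mod_cast hpow)]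
    dsimp only
    rw [List.dropLast_concat, List.getLastD_concat]
    unfold levelSlices
    simp only [List.length_append, List.length_singleton, ← hn, hsize, List.range_succ,
      List.map_append, List.map_cons, List.map_nil]
    congr 1
    · apply List.map_congr_left
      intro k hk
      simp only [List.mem_range] at hk
      have hub : 2 ^ (k + 1) ≤ 2 ^ m := Nat.pow_le_pow_right (by omega) (by omega)
      have h1 : 1 ≤ 2 ^ k := Nat.one_le_two_pow
      have h2 : 2 ^ (k + 1) = 2 ^ k * 2 := by ring
      exact (drop_take_append_of_le l x _ _ (by omega)).symm
    · have h1 : 1 ≤ 2 ^ m := Nat.one_le_two_pow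
      have hdrop : (l ++ [x]).drop (2 ^ m - 1) = [x] := by
        have he : 2 ^ m - 1 = n := by omega
        rw [he, List.drop_append, Nat.sub_self, List.drop_zero,
          List.drop_of_length_le (by omega), List.nil_append]
      rw [hdrop, List.take_of_length_le (by simp; omega), List.nil_append]
  · -- the last level is not yet full: x goes to the end of the last level
    have hn0 : n ≠ 0 := by
      intro h0; apply hpow; simp [h0, hm, Nat.size_zero]
    have hm0 : 0 < m := Nat.size_pos.mpr (by omega)
    have hlt : n < 2 ^ m := Nat.size_le.mp (by omega)
    have hge : 2 ^ (m - 1) ≤ n := Nat.lt_size.mp (show m - 1 < n.size by omega)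
    have hsize : (n + 1).size = m := by
      have h1 : (n + 1).size ≤ m := Nat.size_le.mpr (by omega)
      have h2 : m - 1 < (n + 1).size := Nat.lt_size.mpr (by omega)
      omega
    have hm' : m = m - 1 + 1 := by omega
    unfold levelsortStep
    rw [hlen, if_neg (show ¬ (((n : Int) + 1 == 2 ^ m) = true) by
      rw [beq_iff_eq]; intro hc; exact hpow (by exact_mod_cast hc))]
    dsimp only
    unfold levelSlices
    simp only [List.length_append, List.length_singleton, ← hn, hsize, ← hm]
    have hL : (List.range m).map (fun k => (l.drop (2 ^ k - 1)).take (2 ^ k)) =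
        (List.range (m - 1)).map (fun k => (l.drop (2 ^ k - 1)).take (2 ^ k)) ++
          [(l.drop (2 ^ (m - 1) - 1)).take (2 ^ (m - 1))] := by
      conv_lhs => rw [hm', List.range_succ]
      simp
    have hR : (List.range m).map (fun k => ((l ++ [x]).drop (2 ^ k - 1)).take (2 ^ k)) =
        (List.range (m - 1)).map (fun k => ((l ++ [x]).drop (2 ^ k - 1)).take (2 ^ k)) ++
          [((l ++ [x]).drop (2 ^ (m - 1) - 1)).take (2 ^ (m - 1))] := by
      conv_lhs => rw [hm', List.range_succ]
      simp
    rw [hL, hR, List.dropLast_concat, List.getLastD_concat]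
    congr 1
    · apply List.map_congr_left
      intro k hk
      simp only [List.mem_range] at hk
      have hub : 2 ^ (k + 1) ≤ 2 ^ (m - 1) := Nat.pow_le_pow_right (by omega) (by omega)
      have h1 : 1 ≤ 2 ^ k := Nat.one_le_two_pow
      have h2 : 2 ^ (k + 1) = 2 ^ k * 2 := by ring
      exact (drop_take_append_of_le l x _ _ (by omega)).symm
    · -- the last level gains x
      have h1 : 1 ≤ 2 ^ (m - 1) := Nat.one_le_two_pow
      have h2 : 2 ^ (m - 1) * 2 = 2 ^ m := by
        rw [← pow_succ]; congr 1; omega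
      have hdroplen : (l.drop (2 ^ (m - 1) - 1)).length = n - (2 ^ (m - 1) - 1) := by
        simp [← hn]
      have hshort : (l.drop (2 ^ (m - 1) - 1)).length ≤ 2 ^ (m - 1) := by omega
      have hdrop : (l ++ [x]).drop (2 ^ (m - 1) - 1) = l.drop (2 ^ (m - 1) - 1) ++ [x] := by
        rw [List.drop_append,
          Nat.sub_eq_zero_of_le (show 2 ^ (m - 1) - 1 ≤ l.length by omega), List.drop_zero]
      rw [hdrop, List.take_append, List.take_of_length_le hshort,
        List.take_of_length_le (show ([x] : List Int).length ≤
          2 ^ (m - 1) - (l.drop (2 ^ (m - 1) - 1)).length by simp; omega)]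

theorem levelsort_alt_eq_levelSlices (bt : List Int) : levelsort_alt bt = levelSlices bt := by
  induction bt using List.reverseRecOn with
  | nil => simp [levelsort_alt, levelSlices, PySem.List.enumerate_nil, Nat.size_zero]
  | append_singleton l x ih =>
    unfold levelsort_alt
    rw [enumerate_append_singleton x l 0, List.foldl_append]
    simp only [List.foldl_cons, List.foldl_nil, zero_add]
    rw [show (PySem.List.enumerate l 0).foldl (fun levels p => levelsortStep levels p.1 p.2) [] = levelsort_alt l from rfl,
      ih]
    exact step_levelSlices l x

-- ===== VERDICT (by name: the statement is the Claim_ definition above) =====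
theorem levelsort_spec : Claim_equal_levelsort := by
  intro bt _
  unfold Spec_levelsort
  rw [levelsort_eq_levelSlices, levelsort_alt_eq_levelSlices]
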